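-- pv_equiv track=rewrite | github.com/JehanPatel/Coding-Challenges | HackerEarth/Length of a valley.py | l_area
-- ===== SOURCE A (Python) =====
-- def l_area(arr,n):
--     stack = []
--     left_index = [0]*n
--     index = 0
--     while index<n:
--         if len(stack)==0 or arr[stack[-1]]<arr[index]:
--             stack.append(index)
--             index += 1
--         else:
--             while len(stack)>0:
--                 x = stack.pop()
--                 left_index[x]= index
--
--     while len(stack)>0:
--         x = stack.pop()
--         left_index[x]= index
--
--
--     return left_index
-- ===== SOURCE B (Python) =====
-- def l_area(arr, n):
--     left = [0] * n
--     i = 0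
--     while i < n:
--         j = i
--         while j + 1 < n and arr[j] < arr[j + 1]:
--             j += 1
--         for k in range(i, j + 1):
--             left[k] = j + 1
--         i = j + 1
--     return left
-- ===== Notes on version B (the rewrite author's own statement) =====
-- stated objective: simpler
-- what changed: Replaces the explicit stack of pending indices with a two-index run scan: advance j to the end of each maximal strictly-increasing run, fill left[i..j] with j+1, continue at j+1.
import Mathlib
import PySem

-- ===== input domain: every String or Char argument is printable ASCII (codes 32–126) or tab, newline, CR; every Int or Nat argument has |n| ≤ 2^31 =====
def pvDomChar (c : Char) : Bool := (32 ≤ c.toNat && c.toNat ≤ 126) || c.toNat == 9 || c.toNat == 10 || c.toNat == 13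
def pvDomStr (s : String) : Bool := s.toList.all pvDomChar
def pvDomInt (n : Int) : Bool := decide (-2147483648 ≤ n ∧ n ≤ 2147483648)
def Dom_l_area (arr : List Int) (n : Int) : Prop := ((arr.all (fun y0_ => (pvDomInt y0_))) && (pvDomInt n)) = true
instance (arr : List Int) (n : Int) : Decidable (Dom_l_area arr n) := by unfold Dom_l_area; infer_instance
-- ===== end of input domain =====

-- B drops A's stack of pending indices for a plain two-index scan over maximal strictly-increasing runs (simpler; same O(n) cost).

-- ===== PORT A =====
-- the inner/final 'while len(stack)>0: x = stack.pop(); left_index[x] = index' loop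
def popAllA (stack : List Int) (left : List Int) (v : Int) : List Int :=
  match stack with
  | [] => left
  | x :: rest => popAllA rest (PySem.List.pySetD left x v) v

-- the outer 'while index < n' loop; the stack is kept top-first (append = cons)
def loopA (arr : List Int) (n : Int) (stack : List Int) (left : List Int) (index : Int) : List Int :=
  if _h : index < n then
    match stack with
    | [] => loopA arr n [index] left (index + 1)
    | t :: rest =>
      if PySem.List.pyGetD arr t 0 < PySem.List.pyGetD arr index 0 then
        loopA arr n (index :: t :: rest) left (index + 1)
      else
        loopA arr n [] (popAllA (t :: rest) left index) index
  else
    popAllA stack left index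
termination_by (2 * (n - index)).toNat + stack.length
decreasing_by
  all_goals simp_all
  all_goals omega

def l_area (arr : List Int) (n : Int) : List Int :=
  loopA arr n [] (PySem.List.pyRepeat [0] n) 0

-- ===== PORT B =====
-- inner 'while j + 1 < n and arr[j] < arr[j+1]: j += 1'
def findRunB (arr : List Int) (n : Int) (j : Int) : Int :=
  if j + 1 < n ∧ PySem.List.pyGetD arr j 0 < PySem.List.pyGetD arr (j + 1) 0 then
    findRunB arr n (j + 1)
  else j
termination_by (n - 1 - j).toNat
decreasing_by omega

-- needed by loopB's termination argument
theorem findRunB_ge (arr : List Int) (n j : Int) : j ≤ findRunB arr n j := by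
  rw [findRunB]
  split
  · exact le_trans (by omega) (findRunB_ge arr n (j + 1))
  · exact le_refl j
termination_by (n - 1 - j).toNat
decreasing_by omega

-- 'for k in range(i, j+1): left[k] = j+1' (value v = j+1)
def fillB (left : List Int) (a b v : Int) : List Int :=
  (PySem.List.pyRange a b 1).foldl (fun l k => PySem.List.pySetD l k v) left

-- outer 'while i < n'
def loopB (arr : List Int) (n : Int) (left : List Int) (i : Int) : List Int :=
  if _h : i < n then
    let j := findRunB arr n i
    loopB arr n (fillB left i (j + 1) (j + 1)) (j + 1)
  else left
termination_by (n - i).toNat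
decreasing_by
  have := findRunB_ge arr n i
  omega

def l_area_alt (arr : List Int) (n : Int) : List Int :=
  loopB arr n (PySem.List.pyRepeat [0] n) 0

-- ===== PRECONDITION & SPEC =====
-- Pre_ excludes exactly the inputs on which Python A raises IndexError (n ≥ 2 and n > len(arr)); A returns on all others.
def Pre_l_area (arr : List Int) (n : Int) : Prop := n ≤ arr.length ∨ n ≤ 1
instance (arr : List Int) (n : Int) : Decidable (Pre_l_area arr n) := by unfold Pre_l_area; infer_instance
def pvWitness_l_area : List Int × Int := ([1, 2, 1, 3], 4)

def Spec_l_area (arr : List Int) (n : Int) (out : List Int) : Prop := out = l_area_alt arr n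
instance (arr : List Int) (n : Int) (out : List Int) : Decidable (Spec_l_area arr n out) := by unfold Spec_l_area; infer_instance

-- ===== CLAIM (what is proved, stated in full; the proofs are below) =====
def Claim_equal_l_area : Prop := ∀ (arr : List Int) (n : Int), Dom_l_area arr n → Pre_l_area arr n → Spec_l_area arr n (l_area arr n)

-- ===== LEMMAS AND PROOFS =====

-- one-step unfolding lemmas for the loops
theorem loopA_stop (arr : List Int) (n : Int) (stack left : List Int) (index : Int)
    (h : ¬ index < n) : loopA arr n stack left index = popAllA stack left index := by
  rw [loopA.eq_def]
  simp [h]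

theorem loopA_nil (arr : List Int) (n : Int) (left : List Int) (index : Int)
    (h : index < n) : loopA arr n [] left index = loopA arr n [index] left (index + 1) := by
  rw [loopA.eq_def]
  simp [h]

theorem loopA_cons_pos (arr : List Int) (n : Int) (t : Int) (rest left : List Int) (index : Int)
    (h : index < n) (hc : PySem.List.pyGetD arr t 0 < PySem.List.pyGetD arr index 0) :
    loopA arr n (t :: rest) left index = loopA arr n (index :: t :: rest) left (index + 1) := by
  rw [loopA.eq_def]
  simp [h, hc]

theorem loopA_cons_neg (arr : List Int) (n : Int) (t : Int) (rest left : List Int) (index : Int)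
    (h : index < n) (hc : ¬ PySem.List.pyGetD arr t 0 < PySem.List.pyGetD arr index 0) :
    loopA arr n (t :: rest) left index
      = loopA arr n [] (popAllA (t :: rest) left index) index := by
  rw [loopA.eq_def]
  simp [h, hc]

theorem loopB_stop (arr : List Int) (n : Int) (left : List Int) (i : Int)
    (h : ¬ i < n) : loopB arr n left i = left := by
  rw [loopB.eq_def]
  simp [h]

theorem loopB_go (arr : List Int) (n : Int) (left : List Int) (i : Int)
    (h : i < n) :
    loopB arr n left i
      = loopB arr n (fillB left i (findRunB arr n i + 1) (findRunB arr n i + 1))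
          (findRunB arr n i + 1) := by
  rw [loopB.eq_def]
  simp [h]

theorem findRunB_step (arr : List Int) (n j : Int) :
    findRunB arr n j
      = if j + 1 < n ∧ PySem.List.pyGetD arr j 0 < PySem.List.pyGetD arr (j + 1) 0 then
          findRunB arr n (j + 1)
        else j := by
  conv_lhs => rw [findRunB]

-- A's stack at loop entry with current index m and run start i is exactly [m-1, m-2, ..., i]
def descL (i m : Int) : List Int :=
  if i < m then (m - 1) :: descL i (m - 1) else []
termination_by (m - i).toNat
decreasing_by omega

theorem fillB_nil (left : List Int) (a b v : Int) (h : b <= a) : fillB left a b v = left := by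
  unfold fillB
  rw [PySem.List.pyRange_one_eq_nil h]
  rfl

theorem fillB_cons (left : List Int) (a b v : Int) (h : a < b) :
    fillB left a b v = fillB (PySem.List.pySetD left a v) (a + 1) b v := by
  unfold fillB
  rw [PySem.List.pyRange_one_cons h]
  rfl

theorem fillB_snoc (left : List Int) (a b v : Int) (h : a <= b) :
    fillB left a (b + 1) v = PySem.List.pySetD (fillB left a b v) b v := by
  unfold fillB
  rw [PySem.List.pyRange_one_succ_right h, List.foldl_append]
  rfl

-- setting an index outside [a,b) commutes with filling [a,b)
theorem fillB_setD_comm (v w : Int) :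
    ∀ (k : Nat) (b a : Int) (left : List Int) (p : Int), (b - a).toNat <= k → 0 <= a → 0 <= p →
      (p < a ∨ b <= p) →
      fillB (PySem.List.pySetD left p w) a b v = PySem.List.pySetD (fillB left a b v) p w := by
  intro k
  induction k with
  | zero =>
    intro b a left p hk ha hp hout
    have hba : b <= a := by omega
    rw [fillB_nil _ _ _ _ hba, fillB_nil _ _ _ _ hba]
  | succ k ih =>
    intro b a left p hk ha hp hout
    by_cases hab : a < b
    · rw [fillB_cons _ _ _ _ hab, fillB_cons left _ _ _ hab]
      have hcomm : PySem.List.pySetD (PySem.List.pySetD left p w) a v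
          = PySem.List.pySetD (PySem.List.pySetD left a v) p w := by
        rw [PySem.List.pySetD_of_nonneg _ _ hp, PySem.List.pySetD_of_nonneg _ _ ha,
            PySem.List.pySetD_of_nonneg _ _ ha, PySem.List.pySetD_of_nonneg _ _ hp]
        exact List.set_comm _ _ (by omega)
      rw [hcomm]
      exact ih b (a + 1) (PySem.List.pySetD left a v) p (by omega) (by omega) hp (by omega)
    · have hba : b <= a := by omega
      rw [fillB_nil _ _ _ _ hba, fillB_nil _ _ _ _ hba]

-- popping A's whole stack equals B's range fill
theorem popAll_eq_fill (v : Int) :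
    ∀ (k : Nat) (m i : Int) (left : List Int), (m - i).toNat <= k → 0 <= i →
      popAllA (descL i m) left v = fillB left i m v := by
  intro k
  induction k with
  | zero =>
    intro m i left hk hi
    have hmi : m <= i := by omega
    rw [descL, if_neg (by omega), fillB_nil _ _ _ _ hmi]
    rfl
  | succ k ih =>
    intro m i left hk hi
    by_cases him : i < m
    · rw [descL, if_pos him]
      show popAllA (descL i (m - 1)) (PySem.List.pySetD left (m - 1) v) v = _
      rw [ih (m - 1) i _ (by omega) hi]
      rw [fillB_setD_comm v v k (m - 1) i _ (m - 1) (by omega) hi (by omega) (by omega)]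
      have hsnoc : fillB left i m v = PySem.List.pySetD (fillB left i (m - 1) v) (m - 1) v := by
        conv_lhs => rw [show m = (m - 1) + 1 from by ring]
        rw [fillB_snoc _ _ _ _ (by omega)]
      rw [hsnoc]
    · rw [descL, if_neg him, fillB_nil _ _ _ _ (by omega)]
      rfl

-- the terminal case m = n of the run lemma
theorem loopA_run_n (arr : List Int) (n i : Int) (left : List Int) (hi : 0 <= i) (_hin : i < n) :
    loopA arr n (descL i n) left n
      = loopB arr n (fillB left i (findRunB arr n (n - 1) + 1) (findRunB arr n (n - 1) + 1))
          (findRunB arr n (n - 1) + 1) := by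
  have hm1 : n - 1 + 1 = n := by ring
  have hj : findRunB arr n (n - 1) = n - 1 := by
    rw [findRunB_step, hm1, if_neg]
    intro hh
    exact absurd hh.1 (lt_irrefl n)
  rw [hj, hm1, loopA_stop _ _ _ _ _ (lt_irrefl n), loopB_stop _ _ _ _ (lt_irrefl n)]
  exact popAll_eq_fill n ((n - i).toNat) n i left (le_refl _) hi

-- main invariant: A's loop in mid-run state (stack = [m-1..i], index = m) finishes the run like B
theorem loopA_run (arr : List Int) (n : Int) :
    ∀ (k : Nat) (m i : Int) (left : List Int), (n - m).toNat <= k → 0 <= i → i < m → m <= n →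
      loopA arr n (descL i m) left m
        = loopB arr n (fillB left i (findRunB arr n (m - 1) + 1) (findRunB arr n (m - 1) + 1))
            (findRunB arr n (m - 1) + 1) := by
  intro k
  induction k with
  | zero =>
    intro m i left hk hi him hmn
    have : m = n := by omega
    subst this
    exact loopA_run_n arr m i left hi (by omega)
  | succ k ih =>
    intro m i left hk hi him hmn
    by_cases hm : m = n
    · subst hm
      exact loopA_run_n arr m i left hi (by omega)
    · have hmn' : m < n := lt_of_le_of_ne hmn hm
      have hm1 : m - 1 + 1 = m := by ring
      have hdesc : descL i m = (m - 1) :: descL i (m - 1) := by rw [descL, if_pos him]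
      by_cases hc : PySem.List.pyGetD arr (m - 1) 0 < PySem.List.pyGetD arr m 0
      · -- run continues: stack grows, index advances
        have hrun : findRunB arr n (m - 1) = findRunB arr n m := by
          rw [findRunB_step arr n (m - 1), hm1, if_pos ⟨hmn', hc⟩]
        have hd2 : descL i (m + 1) = m :: (m - 1) :: descL i (m - 1) := by
          rw [descL, if_pos (by omega)]
          simp only [add_sub_cancel_right]
          rw [hdesc]
        rw [hdesc, loopA_cons_pos arr n (m - 1) _ left m hmn' hc, ← hd2,
          ih (m + 1) i left (by omega) hi (by omega) (by omega)]
        simp only [add_sub_cancel_right]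
        rw [hrun]
      · -- run breaks: pop all (= fill [i,m) with m), restart a fresh run at m
        have hrun : findRunB arr n (m - 1) = m - 1 := by
          rw [findRunB_step arr n (m - 1), hm1, if_neg]
          intro hh
          exact hc hh.2
        have hd1 : descL m (m + 1) = [m] := by
          rw [descL, if_pos (by omega)]
          simp only [add_sub_cancel_right]
          rw [descL, if_neg (lt_irrefl m)]
        rw [hdesc, loopA_cons_neg arr n (m - 1) _ left m hmn' hc, ← hdesc,
          popAll_eq_fill m ((m - i).toNat) m i left (le_refl _) hi,
          loopA_nil arr n _ m hmn', ← hd1,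
          ih (m + 1) m _ (by omega) (by omega) (by omega) (by omega)]
        simp only [add_sub_cancel_right]
        rw [hrun, hm1, loopB_go arr n (fillB left i m m) m hmn']

-- ===== VERDICT (by name: the statement is the Claim_ definition above) =====
theorem l_area_spec : Claim_equal_l_area := by
  intro arr n _hDom _hPre
  unfold Spec_l_area l_area l_area_alt
  by_cases hn : 0 < n
  · have hd : descL 0 1 = [(0 : Int)] := by
      rw [descL, if_pos (by omega), show (1 : Int) - 1 = 0 from by ring,
        descL, if_neg (lt_irrefl 0)]
    generalize PySem.List.pyRepeat [(0 : Int)] n = rep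
    rw [loopA_nil arr n rep 0 hn, ← hd, show (0 : Int) + 1 = 1 from by ring,
      loopA_run arr n ((n - 1).toNat) 1 0 rep (by omega) (by omega) (by omega) (by omega)]
    simp only [show (1 : Int) - 1 = 0 from by ring]
    rw [loopB_go arr n rep 0 hn]
  · rw [loopA_stop _ _ _ _ _ hn, loopB_stop _ _ _ _ hn]
    rfl
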